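-- pv_equiv track=rewrite | github.com/EvilBoom/Qt_Oil_New | Controller/KnowledgeGraphController.py | _generate_separator_layout
-- ===== SOURCE A (Python) =====
-- from typing import Dict, Any, List, Optional
--
-- def _generate_separator_layout(nodes: List[Dict]) -> Dict:
--     """生成分离器图谱布局"""
--     layout = {}
--     center_x, center_y = 400, 300
--
--     # GLR分析中心
--     layout['glr_analysis'] = {'x': center_x, 'y': center_y}
--
--     # 决策选项
--     decision_nodes = [n for n in nodes if n['type'] == 'decision']
--     for i, node in enumerate(decision_nodes):
--         layout[node['id']] = {'x': center_x + 150, 'y': center_y - 60 + i * 60}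
--
--     # 分离器选项
--     separator_nodes = [n for n in nodes if n['type'] == 'separator_option']
--     for i, node in enumerate(separator_nodes):
--         layout[node['id']] = {'x': center_x + 300, 'y': center_y - 40 + i * 40}
--
--     # 影响因素
--     factor_nodes = [n for n in nodes if n['type'] == 'benefit']
--     for i, node in enumerate(factor_nodes):
--         layout[node['id']] = {'x': center_x - 150, 'y': center_y - 30 + i * 60}
--
--     return layout
-- ===== SOURCE B (Python) =====
-- def _generate_separator_layout(nodes):
--     """生成分离器图谱布局 — one pass with per-type counters, then a stable sort by
--     type rank recovers A's grouped key order (stable sort == filter-concatenation)."""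
--     params = {'decision': (0, 150, -60, 60),
--               'separator_option': (1, 300, -40, 40),
--               'benefit': (2, -150, -30, 60)}
--     counts = {}
--     placed = []
--     for n in nodes:
--         t = n['type']
--         if t in params:
--             rank, dx, base, step = params[t]
--             i = counts.get(t, 0)
--             counts[t] = i + 1
--             placed.append((rank, n['id'], {'x': 400 + dx, 'y': 300 + base + i * step}))
--     layout = {'glr_analysis': {'x': 400, 'y': 300}}
--     for _, nid, coords in sorted(placed, key=lambda p: p[0]):
--         layout[nid] = coords
--     return layout
-- ===== Notes on version B (the rewrite author's own statement) =====
-- stated objective: alternative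
-- what changed: A makes three separate filter-then-enumerate passes (one per hard-coded type); B makes ONE pass over nodes keeping a per-type counter dict, tagging each placed node with a table-driven rank and its coordinates, and then recovers A's grouped insertion order by a stable sort on the rank (stability makes the sorted list exactly the concatenation of the three filtered groups).
-- outside the precondition, e.g. on _generate_separator_layout([{'id': 'a'}]): A raises KeyError, B raises KeyError; on _generate_separator_layout([{'type': 'decision'}]): A raises KeyError, B raises KeyError
import Mathlib
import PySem

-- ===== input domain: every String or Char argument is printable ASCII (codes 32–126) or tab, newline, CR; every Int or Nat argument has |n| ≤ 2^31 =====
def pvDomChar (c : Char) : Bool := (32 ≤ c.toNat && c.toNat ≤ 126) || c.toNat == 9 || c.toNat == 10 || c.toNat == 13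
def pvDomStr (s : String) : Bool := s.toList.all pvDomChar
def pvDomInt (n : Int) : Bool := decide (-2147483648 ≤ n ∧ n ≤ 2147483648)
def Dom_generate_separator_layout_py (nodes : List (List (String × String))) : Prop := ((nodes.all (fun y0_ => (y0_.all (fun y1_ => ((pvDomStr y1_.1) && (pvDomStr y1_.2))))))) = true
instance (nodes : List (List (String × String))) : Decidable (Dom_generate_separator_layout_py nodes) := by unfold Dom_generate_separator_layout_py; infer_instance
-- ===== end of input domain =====

-- B replaces A's three filter-then-enumerate passes by ONE counting pass that tags each
-- placed node with a type rank, followed by a stable sort on the rank that recovers A's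
-- grouped key order (objective: alternative; same output, including key order).

-- ===== PORT A =====
-- n[k] for a node dict; under Pre_ the key is present, so the KeyError branch is unreachable.
def pvNodeGet (n : List (String × String)) (k : String) : String :=
  (PySem.Dict.mk n).getD k ""

def generate_separator_layout_py (nodes : List (List (String × String))) : List (String × List (String × Int)) :=
  let cx : Int := 400
  let cy : Int := 300
  let layout : PySem.Dict String (List (String × Int)) :=
    PySem.Dict.empty.insert "glr_analysis" [("x", cx), ("y", cy)]
  let decision_nodes := nodes.filter (fun n => pvNodeGet n "type" == "decision")
  let layout := (PySem.List.enumerate decision_nodes).foldl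
    (fun lay e => lay.insert (pvNodeGet e.2 "id") [("x", cx + 150), ("y", cy - 60 + e.1 * 60)]) layout
  let separator_nodes := nodes.filter (fun n => pvNodeGet n "type" == "separator_option")
  let layout := (PySem.List.enumerate separator_nodes).foldl
    (fun lay e => lay.insert (pvNodeGet e.2 "id") [("x", cx + 300), ("y", cy - 40 + e.1 * 40)]) layout
  let factor_nodes := nodes.filter (fun n => pvNodeGet n "type" == "benefit")
  let layout := (PySem.List.enumerate factor_nodes).foldl
    (fun lay e => lay.insert (pvNodeGet e.2 "id") [("x", cx - 150), ("y", cy - 30 + e.1 * 60)]) layout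
  layout.items

-- ===== PORT B =====
-- B's static parameter table: type → (rank, dx, base, step).
def pvParams : PySem.Dict String (Int × Int × Int × Int) :=
  PySem.Dict.mk [("decision", (0, 150, -60, 60)),
                 ("separator_option", (1, 300, -40, 40)),
                 ("benefit", (2, -150, -30, 60))]

def generate_separator_layout_py_alt (nodes : List (List (String × String))) : List (String × List (String × Int)) :=
  let st := nodes.foldl
    (fun (st : PySem.Dict String Int × List (Int × String × List (String × Int))) n =>
      let t := pvNodeGet n "type"
      match pvParams.get? t with           -- 'if t in params: rank, dx, base, step = params[t]'
      | some (rank, dx, base, step) =>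
        let i := st.1.getD t 0
        (st.1.insert t (i + 1),
         st.2 ++ [(rank, pvNodeGet n "id", [("x", 400 + dx), ("y", 300 + base + i * step)])])
      | none => st)
    (PySem.Dict.empty, [])
  let layout : PySem.Dict String (List (String × Int)) :=
    PySem.Dict.empty.insert "glr_analysis" [("x", (400 : Int)), ("y", (300 : Int))]
  let layout := (PySem.List.sorted st.2 (fun p => p.1) false).foldl
    (fun lay p => lay.insert p.2.1 p.2.2) layout
  layout.items

-- ===== PRECONDITION & SPEC =====
-- Pre_ excludes exactly the inputs on which A raises KeyError: a node without a 'type'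
-- key, or a node of one of the three placed types without an 'id' key.
def Pre_generate_separator_layout_py (nodes : List (List (String × String))) : Prop :=
  ∀ n ∈ nodes, (PySem.Dict.mk n).contains "type" = true ∧
    ((PySem.Dict.mk n).getD "type" "" ∈ (["decision", "separator_option", "benefit"] : List String) →
      (PySem.Dict.mk n).contains "id" = true)
instance (nodes : List (List (String × String))) : Decidable (Pre_generate_separator_layout_py nodes) := by unfold Pre_generate_separator_layout_py; infer_instance

def pvWitness_generate_separator_layout_py : (List (List (String × String))) :=
  [[("type", "decision"), ("id", "d1")], [("type", "benefit"), ("id", "b1")], [("type", "other")]]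

def Spec_generate_separator_layout_py (nodes : List (List (String × String))) (out : List (String × List (String × Int))) : Prop := out = generate_separator_layout_py_alt nodes
instance (nodes : List (List (String × String))) (out : List (String × List (String × Int))) : Decidable (Spec_generate_separator_layout_py nodes out) := by unfold Spec_generate_separator_layout_py; infer_instance

-- ===== CLAIM (what is proved, stated in full; the proofs are below) =====
def Claim_equal_generate_separator_layout_py : Prop := ∀ (nodes : List (List (String × String))), Dom_generate_separator_layout_py nodes → Pre_generate_separator_layout_py nodes → Spec_generate_separator_layout_py nodes (generate_separator_layout_py nodes)

-- ===== LEMMAS AND PROOFS =====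

-- B's fold body, named for the proofs (definitionally the fold body of the B port).
def bstep (st : PySem.Dict String Int × List (Int × String × List (String × Int)))
    (n : List (String × String)) : PySem.Dict String Int × List (Int × String × List (String × Int)) :=
  let t := pvNodeGet n "type"
  match pvParams.get? t with
  | some (rank, dx, base, step) =>
    let i := st.1.getD t 0
    (st.1.insert t (i + 1),
     st.2 ++ [(rank, pvNodeGet n "id", [("x", 400 + dx), ("y", 300 + base + i * step)])])
  | none => st

theorem insertBy_append_not {α : Type} (before : α → α → Bool) (x : α) (as bs : List α)
    (h : ∀ a ∈ as, before x a = false) :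
    PySem.List.insertBy before x (as ++ bs) = as ++ PySem.List.insertBy before x bs := by
  induction as with
  | nil => simp
  | cons a as ih =>
    have ha : before x a = false := h a (by simp)
    simp only [List.cons_append, PySem.List.insertBy, ha]
    simp only [Bool.false_eq_true, if_false]
    exact congrArg (a :: ·) (ih (fun a h' => h a (by simp [h'])))

theorem insertBy_all_before {α : Type} (before : α → α → Bool) (x : α) (bs : List α)
    (h : ∀ b ∈ bs, before x b = true) :
    PySem.List.insertBy before x bs = x :: bs := by
  cases bs with
  | nil => rfl
  | cons b bs => simp [PySem.List.insertBy, h b (by simp)]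

-- Stable sort on a rank in {0,1,2} is exactly the concatenation of the three filtered groups.
theorem stable3 (l : List (Int × String × List (String × Int)))
    (h : ∀ q ∈ l, q.1 = 0 ∨ q.1 = 1 ∨ q.1 = 2) :
    PySem.List.sorted l (fun q => q.1) false
      = l.filter (fun q => q.1 == 0) ++ l.filter (fun q => q.1 == 1) ++ l.filter (fun q => q.1 == 2) := by
  induction l using List.reverseRecOn with
  | nil => simp [PySem.List.sorted_eq_foldl_insertBy]
  | append_singleton l x ih =>
    have hsorted : PySem.List.sorted (l ++ [x]) (fun q => q.1) false
        = PySem.List.insertBy (fun a b => decide (a.1 < b.1)) x (PySem.List.sorted l (fun q => q.1) false) := by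
      simp [PySem.List.sorted_eq_foldl_insertBy, List.foldl_append]
    rw [hsorted, ih (fun q hq => h q (by simp [hq]))]
    have h0 : ∀ q ∈ l.filter (fun q => q.1 == (0:Int)), q.1 = 0 := by
      intro q hq; simpa using (List.mem_filter.mp hq).2
    have h1 : ∀ q ∈ l.filter (fun q => q.1 == (1:Int)), q.1 = 1 := by
      intro q hq; simpa using (List.mem_filter.mp hq).2
    have h2 : ∀ q ∈ l.filter (fun q => q.1 == (2:Int)), q.1 = 2 := by
      intro q hq; simpa using (List.mem_filter.mp hq).2
    rcases h x (by simp) with hx | hx | hx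
    · rw [List.append_assoc, insertBy_append_not _ _ _ _ (fun a ha => by simp [h0 a ha, hx]),
          insertBy_all_before _ _ _ (fun b hb => by
            rcases List.mem_append.mp hb with hb | hb
            · simp [h1 b hb, hx]
            · simp [h2 b hb, hx])]
      simp [List.filter_append, hx]
    · rw [List.append_assoc, insertBy_append_not _ _ _ _ (fun a ha => by simp [h0 a ha, hx]),
          insertBy_append_not _ _ _ _ (fun a ha => by simp [h1 a ha, hx]),
          insertBy_all_before _ _ _ (fun b hb => by simp [h2 b hb, hx])]
      simp [List.filter_append, hx]
    · rw [List.append_assoc, insertBy_append_not _ _ _ _ (fun a ha => by simp [h0 a ha, hx]),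
          insertBy_append_not _ _ _ _ (fun a ha => by simp [h1 a ha, hx]),
          PySem.List.insertBy_of_forall_not_before _ _ _ (fun a ha => by simp [h2 a ha, hx])]
      simp [List.filter_append, hx]

-- Every entry B places carries rank 0, 1 or 2.
theorem pass_ranks (nodes : List (List (String × String)))
    (c : PySem.Dict String Int) (p : List (Int × String × List (String × Int)))
    (hp : ∀ q ∈ p, q.1 = 0 ∨ q.1 = 1 ∨ q.1 = 2) :
    ∀ q ∈ (nodes.foldl bstep (c, p)).2, q.1 = 0 ∨ q.1 = 1 ∨ q.1 = 2 := by
  induction nodes generalizing c p with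
  | nil => exact hp
  | cons n ns ih =>
    rw [List.foldl_cons]
    by_cases h1 : pvNodeGet n "type" = "decision"
    · have hb : bstep (c, p) n
          = (c.insert "decision" (c.getD "decision" 0 + 1),
             p ++ [((0:Int), pvNodeGet n "id",
                    [("x", (400:Int) + 150), ("y", (300:Int) + (-60) + c.getD "decision" 0 * 60)])]) := by
        simp [bstep, h1, pvParams, PySem.Dict.get?]
      rw [hb]
      refine ih _ _ (fun q hq => ?_)
      rcases List.mem_append.mp hq with hq | hq
      · exact hp q hq
      · left; simp_all
    · by_cases h2 : pvNodeGet n "type" = "separator_option"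
      · have hb : bstep (c, p) n
            = (c.insert "separator_option" (c.getD "separator_option" 0 + 1),
               p ++ [((1:Int), pvNodeGet n "id",
                      [("x", (400:Int) + 300), ("y", (300:Int) + (-40) + c.getD "separator_option" 0 * 40)])]) := by
          simp [bstep, h2, pvParams, PySem.Dict.get?]
        rw [hb]
        refine ih _ _ (fun q hq => ?_)
        rcases List.mem_append.mp hq with hq | hq
        · exact hp q hq
        · right; left; simp_all
      · by_cases h3 : pvNodeGet n "type" = "benefit"
        · have hb : bstep (c, p) n
              = (c.insert "benefit" (c.getD "benefit" 0 + 1),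
                 p ++ [((2:Int), pvNodeGet n "id",
                        [("x", (400:Int) + (-150)), ("y", (300:Int) + (-30) + c.getD "benefit" 0 * 60)])]) := by
            simp [bstep, h3, pvParams, PySem.Dict.get?]
          rw [hb]
          refine ih _ _ (fun q hq => ?_)
          rcases List.mem_append.mp hq with hq | hq
          · exact hp q hq
          · right; right; simp_all
        · have hb : bstep (c, p) n = (c, p) := by
            simp only [bstep]
            have hnone : pvParams.get? (pvNodeGet n "type") = none := by
              simp [pvParams, PySem.Dict.get?]
              exact ⟨fun h => h1 h.symm, fun h => h2 h.symm, fun h => h3 h.symm⟩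
            rw [hnone]
          rw [hb]; exact ih _ _ hp

-- The rank-r slice of B's placed list is A's r-th enumerated filtered group
-- (indices shifted by the counter's current value for that type).
theorem pass_filters (nodes : List (List (String × String)))
    (c : PySem.Dict String Int) (p : List (Int × String × List (String × Int))) :
    ((nodes.foldl bstep (c, p)).2).filter (fun q => q.1 == 0)
      = p.filter (fun q => q.1 == 0)
        ++ (PySem.List.enumerate (nodes.filter (fun n => pvNodeGet n "type" == "decision")) (c.getD "decision" 0)).map
             (fun e => ((0:Int), pvNodeGet e.2 "id", [("x", (550:Int)), ("y", 240 + e.1 * 60)]))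
    ∧ ((nodes.foldl bstep (c, p)).2).filter (fun q => q.1 == 1)
      = p.filter (fun q => q.1 == 1)
        ++ (PySem.List.enumerate (nodes.filter (fun n => pvNodeGet n "type" == "separator_option")) (c.getD "separator_option" 0)).map
             (fun e => ((1:Int), pvNodeGet e.2 "id", [("x", (700:Int)), ("y", 260 + e.1 * 40)]))
    ∧ ((nodes.foldl bstep (c, p)).2).filter (fun q => q.1 == 2)
      = p.filter (fun q => q.1 == 2)
        ++ (PySem.List.enumerate (nodes.filter (fun n => pvNodeGet n "type" == "benefit")) (c.getD "benefit" 0)).map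
             (fun e => ((2:Int), pvNodeGet e.2 "id", [("x", (250:Int)), ("y", 270 + e.1 * 60)])) := by
  induction nodes generalizing c p with
  | nil => simp [PySem.List.enumerate_nil]
  | cons n ns ih =>
    rw [List.foldl_cons]
    by_cases h1 : pvNodeGet n "type" = "decision"
    · have hb : bstep (c, p) n
          = (c.insert "decision" (c.getD "decision" 0 + 1),
             p ++ [((0:Int), pvNodeGet n "id",
                    [("x", (400:Int) + 150), ("y", (300:Int) + (-60) + c.getD "decision" 0 * 60)])]) := by
        simp [bstep, h1, pvParams, PySem.Dict.get?]
      rw [hb]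
      obtain ⟨i0, i1, i2⟩ := ih (c.insert "decision" (c.getD "decision" 0 + 1))
        (p ++ [((0:Int), pvNodeGet n "id",
                [("x", (400:Int) + 150), ("y", (300:Int) + (-60) + c.getD "decision" 0 * 60)])])
      refine ⟨?_, ?_, ?_⟩
      · rw [i0]
        simp only [PySem.Dict.getD_insert, List.filter_append]
        simp [h1, PySem.List.enumerate_cons]
      · rw [i1]
        rw [PySem.Dict.getD_insert]
        simp [h1, List.filter_append]
      · rw [i2]
        rw [PySem.Dict.getD_insert]
        simp [h1, List.filter_append]
    · by_cases h2 : pvNodeGet n "type" = "separator_option"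
      · have hb : bstep (c, p) n
            = (c.insert "separator_option" (c.getD "separator_option" 0 + 1),
               p ++ [((1:Int), pvNodeGet n "id",
                      [("x", (400:Int) + 300), ("y", (300:Int) + (-40) + c.getD "separator_option" 0 * 40)])]) := by
          simp [bstep, h2, pvParams, PySem.Dict.get?]
        rw [hb]
        obtain ⟨i0, i1, i2⟩ := ih (c.insert "separator_option" (c.getD "separator_option" 0 + 1))
          (p ++ [((1:Int), pvNodeGet n "id",
                  [("x", (400:Int) + 300), ("y", (300:Int) + (-40) + c.getD "separator_option" 0 * 40)])])
        refine ⟨?_, ?_, ?_⟩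
        · rw [i0]; rw [PySem.Dict.getD_insert]
          simp [h2, List.filter_append]
        · rw [i1]
          simp only [PySem.Dict.getD_insert, List.filter_append]
          simp [h2, PySem.List.enumerate_cons]
        · rw [i2]; rw [PySem.Dict.getD_insert]
          simp [h2, List.filter_append]
      · by_cases h3 : pvNodeGet n "type" = "benefit"
        · have hb : bstep (c, p) n
              = (c.insert "benefit" (c.getD "benefit" 0 + 1),
                 p ++ [((2:Int), pvNodeGet n "id",
                        [("x", (400:Int) + (-150)), ("y", (300:Int) + (-30) + c.getD "benefit" 0 * 60)])]) := by
            simp [bstep, h3, pvParams, PySem.Dict.get?]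
          rw [hb]
          obtain ⟨i0, i1, i2⟩ := ih (c.insert "benefit" (c.getD "benefit" 0 + 1))
            (p ++ [((2:Int), pvNodeGet n "id",
                    [("x", (400:Int) + (-150)), ("y", (300:Int) + (-30) + c.getD "benefit" 0 * 60)])])
          refine ⟨?_, ?_, ?_⟩
          · rw [i0]; rw [PySem.Dict.getD_insert]
            simp [h3, List.filter_append]
          · rw [i1]; rw [PySem.Dict.getD_insert]
            simp [h3, List.filter_append]
          · rw [i2]
            simp only [PySem.Dict.getD_insert, List.filter_append]
            simp [h3, PySem.List.enumerate_cons]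
        · have hb : bstep (c, p) n = (c, p) := by
            simp only [bstep]
            have hnone : pvParams.get? (pvNodeGet n "type") = none := by
              simp [pvParams, PySem.Dict.get?]
              exact ⟨fun h => h1 h.symm, fun h => h2 h.symm, fun h => h3 h.symm⟩
            rw [hnone]
          rw [hb]
          obtain ⟨i0, i1, i2⟩ := ih c p
          exact ⟨by rw [i0]; simp [h1], by rw [i1]; simp [h2], by rw [i2]; simp [h3]⟩

-- Folding the dict inserts over a mapped enumerate list is folding over the enumerate list.
theorem foldl_map_insert (v : Int → List (String × Int)) (r : Int)
    (l : List (List (String × String))) (s : Int)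
    (lay : PySem.Dict String (List (String × Int))) :
    ((PySem.List.enumerate l s).map
        (fun e => (r, pvNodeGet e.2 "id", v e.1))).foldl
      (fun lay2 q => lay2.insert q.2.1 q.2.2) lay
    = (PySem.List.enumerate l s).foldl
        (fun lay2 e => lay2.insert (pvNodeGet e.2 "id") (v e.1)) lay := by
  rw [List.foldl_map]

-- ===== VERDICT (by name: the statement is the Claim_ definition above) =====
theorem generate_separator_layout_py_spec : Claim_equal_generate_separator_layout_py := by
  intro nodes _ _
  unfold Spec_generate_separator_layout_py
  unfold generate_separator_layout_py generate_separator_layout_py_alt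
  simp only []
  have hranks := pass_ranks nodes PySem.Dict.empty [] (by simp)
  obtain ⟨f0, f1, f2⟩ := pass_filters nodes PySem.Dict.empty []
  have hfold : (nodes.foldl
      (fun (st : PySem.Dict String Int × List (Int × String × List (String × Int))) n =>
        let t := pvNodeGet n "type"
        match pvParams.get? t with
        | some (rank, dx, base, step) =>
          let i := st.1.getD t 0
          (st.1.insert t (i + 1),
           st.2 ++ [(rank, pvNodeGet n "id", [("x", 400 + dx), ("y", 300 + base + i * step)])])
        | none => st)
      (PySem.Dict.empty, [])) = nodes.foldl bstep (PySem.Dict.empty, []) := rfl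
  rw [hfold]
  rw [stable3 _ hranks]
  have hd0 : (PySem.Dict.empty : PySem.Dict String Int).getD "decision" 0 = 0 := by
    simp [PySem.Dict.empty, PySem.Dict.getD, PySem.Dict.get?]
  have hd1 : (PySem.Dict.empty : PySem.Dict String Int).getD "separator_option" 0 = 0 := by
    simp [PySem.Dict.empty, PySem.Dict.getD, PySem.Dict.get?]
  have hd2 : (PySem.Dict.empty : PySem.Dict String Int).getD "benefit" 0 = 0 := by
    simp [PySem.Dict.empty, PySem.Dict.getD, PySem.Dict.get?]
  rw [hd0] at f0; rw [hd1] at f1; rw [hd2] at f2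
  rw [f0, f1, f2]
  simp only [List.filter_nil, List.nil_append, List.foldl_append]
  rw [foldl_map_insert (fun i => [("x", (550:Int)), ("y", 240 + i * 60)]),
      foldl_map_insert (fun i => [("x", (700:Int)), ("y", 260 + i * 40)]),
      foldl_map_insert (fun i => [("x", (250:Int)), ("y", 270 + i * 60)])]
  norm_num
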